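-- pv_equiv track=rewrite | github.com/EnriqueGambra/Amazon-Alexa-Skill | Adelphi Academic Calendar/get_adelphi_info.py | _combine_dates_with_year
-- ===== SOURCE A (Python) =====
-- def _combine_dates_with_year(dates):
--     """Helper method that will combine the dates with the year"""
--     # Create two lists, one for dates and the other for events
--
--     dates_with_year = list()  # Creates a new list that will have the dates with year
--     year = 2019     # The year we start at, 2019 needs to be fixed where it allows the program to be reusable, but for now its hardcoded in
--     is_new_year = False
--     # Appends the proper dates to each month
--     for date in dates:
--         if date.startswith("january") and is_new_year is False:
--             year += 1
--             is_new_year = True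
--         elif date.startswith("january") and is_new_year is True:
--             pass
--         else:
--             is_new_year = False
--         dates_with_year.append(f'{date} {year}')
--
--     return dates_with_year
-- ===== SOURCE B (Python) =====
-- def _combine_dates_with_year(dates):
--     """Run-start detection + prefix-count: year = 2019 + number of january-runs started so far."""
--     starts = [d.startswith("january") and not p.startswith("january")
--               for p, d in zip([""] + dates, dates)]
--     counts = []
--     c = 0
--     for s in starts:
--         c += s
--         counts.append(c)
--     return [f'{date} {2019 + c}' for date, c in zip(dates, counts)]
-- ===== Notes on version B (the rewrite author's own statement) =====
-- stated objective: alternative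
-- what changed: Replaces the is_new_year state-machine flag with a stateless pass: mark january-run starts by comparing each date to its predecessor, take a running count of run starts, and format each date with 2019 plus that count.
import Mathlib
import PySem

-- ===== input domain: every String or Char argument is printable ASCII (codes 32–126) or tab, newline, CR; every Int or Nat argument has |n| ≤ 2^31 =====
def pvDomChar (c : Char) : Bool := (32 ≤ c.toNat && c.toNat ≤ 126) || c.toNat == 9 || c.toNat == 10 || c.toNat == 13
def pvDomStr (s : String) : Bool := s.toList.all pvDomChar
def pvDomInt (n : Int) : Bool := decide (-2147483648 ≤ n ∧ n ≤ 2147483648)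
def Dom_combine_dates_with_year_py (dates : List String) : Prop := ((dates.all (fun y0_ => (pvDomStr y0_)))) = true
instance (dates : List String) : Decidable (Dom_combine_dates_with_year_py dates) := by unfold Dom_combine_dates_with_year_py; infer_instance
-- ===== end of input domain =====

-- B replaces A's is_new_year mutable flag with a stateless run-start detection (compare each
-- date to its predecessor) followed by a running-count pass; same O(n) cost (objective: alternative).

-- ===== PORT A =====
-- the loop body of A: branch on startswith/is_new_year, then append f'{date} {year}'
def pvStepA (st : List String × Int × Bool) (date : String) : List String × Int × Bool :=
  let (acc, year, is_new_year) := st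
  let (year, is_new_year) :=
    if PySem.Str.startswith date "january" && (is_new_year == false) then (year + 1, true)
    else if PySem.Str.startswith date "january" && (is_new_year == true) then (year, is_new_year)
    else (year, false)
  (acc ++ [date ++ " " ++ PySem.Int.toStr year], year, is_new_year)

def combine_dates_with_year_py (dates : List String) : List String :=
  (dates.foldl pvStepA ([], 2019, false)).1

-- ===== PORT B =====
def pvJan (s : String) : Bool := PySem.Str.startswith s "january"

-- starts: pair each date with its predecessor ("" sentinel before the first) and test run-start
def pvStarts (dates : List String) : List Bool :=
  (("" :: dates).zip dates).map (fun pd => pvJan pd.2 && !pvJan pd.1)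

-- running count of run starts (the counts/c loop of Source B)
def pvAccum : List Bool → Int → List Int
  | [], _ => []
  | b :: rest, c =>
      let c' := c + (if b then 1 else 0)
      c' :: pvAccum rest c'

def combine_dates_with_year_py_alt (dates : List String) : List String :=
  (dates.zip (pvAccum (pvStarts dates) 0)).map
    (fun dc => dc.1 ++ " " ++ PySem.Int.toStr (2019 + dc.2))

-- ===== PRECONDITION & SPEC =====
def Spec_combine_dates_with_year_py (dates : List String) (out : List String) : Prop := out = combine_dates_with_year_py_alt dates
instance (dates : List String) (out : List String) : Decidable (Spec_combine_dates_with_year_py dates out) := by unfold Spec_combine_dates_with_year_py; infer_instance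

-- ===== CLAIM (what is proved, stated in full; the proofs are below) =====
def Claim_equal_combine_dates_with_year_py : Prop := ∀ (dates : List String), Dom_combine_dates_with_year_py dates → Spec_combine_dates_with_year_py dates (combine_dates_with_year_py dates)

-- ===== LEMMAS AND PROOFS =====

-- common intermediate form: year carried along, incremented exactly at run starts
def pvS : List String → String → Int → List String
  | [], _, _ => []
  | d :: rest, prev, year =>
      let y := year + (if pvJan d && !pvJan prev then 1 else 0)
      (d ++ " " ++ PySem.Int.toStr y) :: pvS rest d y

lemma lemA : ∀ (dates : List String) (acc : List String) (year : Int) (prev : String),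
    (dates.foldl pvStepA (acc, year, pvJan prev)).1 = acc ++ pvS dates prev year := by
  intro dates
  induction dates with
  | nil => intro acc year prev; simp [pvS]
  | cons d rest ih =>
      intro acc year prev
      by_cases hd : pvJan d
      · by_cases hp : pvJan prev
        · have : pvStepA (acc, year, pvJan prev) d
              = (acc ++ [d ++ " " ++ PySem.Int.toStr year], year, pvJan d) := by
            simp [pvStepA, pvJan] at hd hp ⊢; simp [hd, hp]
          simp only [List.foldl_cons, this, ih]
          simp [pvS, hd, hp]
        · have : pvStepA (acc, year, pvJan prev) d
              = (acc ++ [d ++ " " ++ PySem.Int.toStr (year + 1)], year + 1, pvJan d) := by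
            simp [pvStepA, pvJan] at hd hp ⊢; simp [hd, hp]
          simp only [List.foldl_cons, this, ih]
          simp [pvS, hd, hp]
      · have : pvStepA (acc, year, pvJan prev) d
            = (acc ++ [d ++ " " ++ PySem.Int.toStr year], year, pvJan d) := by
          simp [pvStepA, pvJan] at hd ⊢; simp [hd]
        simp only [List.foldl_cons, this, ih]
        simp [pvS, hd]

lemma lemB : ∀ (dates : List String) (prev : String) (c : Int),
    ((dates.zip (pvAccum (((prev :: dates).zip dates).map (fun pd => pvJan pd.2 && !pvJan pd.1)) c)).map
      (fun dc => dc.1 ++ " " ++ PySem.Int.toStr (2019 + dc.2))) = pvS dates prev (2019 + c) := by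
  intro dates
  induction dates with
  | nil => intro prev c; simp [pvS]
  | cons d rest ih =>
      intro prev c
      simp only [List.zip_cons_cons, List.map_cons, pvAccum, pvS, ih]
      have harith : 2019 + (c + (if pvJan d && !pvJan prev then 1 else 0))
          = 2019 + c + (if pvJan d && !pvJan prev then 1 else 0) := by ring
      rw [harith]

lemma janEmpty : pvJan "" = false := by decide

-- ===== VERDICT (by name: the statement is the Claim_ definition above) =====
theorem combine_dates_with_year_py_spec : Claim_equal_combine_dates_with_year_py := by
  intro dates _
  unfold Spec_combine_dates_with_year_py
  unfold combine_dates_with_year_py combine_dates_with_year_py_alt pvStarts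
  rw [show (false : Bool) = pvJan "" from janEmpty.symm, lemA dates [] 2019 "", lemB dates "" 0]
  simp
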